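-- pv_equiv track=rewrite | github.com/miliar/Code_Jam_Webscraper | solutions_python/solutions_year15_round0_nr1/2313.py | standing_ovation
-- ===== SOURCE A (Python) =====
-- def standing_ovation(audience):
--     tot = 0
--     req = 0
--     for s, n in enumerate(audience):
--         if tot >= s:
--             tot += n
--         else:
--             req += s - tot
--             tot += n + s - tot
--     return req
-- ===== SOURCE B (Python) =====
-- def standing_ovation(audience):
--     sums = []
--     c = 0
--     for n in audience:
--         sums.append(c)
--         c += n
--     return max([0] + [s - c for s, c in enumerate(sums)])
-- ===== Notes on version B (the rewrite author's own statement) =====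
-- stated objective: simpler
-- what changed: B replaces A's single branched fold over a paired state (combined total + friends) by three staged passes: build the audience-only prefix-sum list, take the deficit s - cum at each position by a comprehension, and return the maximum deficit (floored at 0).
import Mathlib
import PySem

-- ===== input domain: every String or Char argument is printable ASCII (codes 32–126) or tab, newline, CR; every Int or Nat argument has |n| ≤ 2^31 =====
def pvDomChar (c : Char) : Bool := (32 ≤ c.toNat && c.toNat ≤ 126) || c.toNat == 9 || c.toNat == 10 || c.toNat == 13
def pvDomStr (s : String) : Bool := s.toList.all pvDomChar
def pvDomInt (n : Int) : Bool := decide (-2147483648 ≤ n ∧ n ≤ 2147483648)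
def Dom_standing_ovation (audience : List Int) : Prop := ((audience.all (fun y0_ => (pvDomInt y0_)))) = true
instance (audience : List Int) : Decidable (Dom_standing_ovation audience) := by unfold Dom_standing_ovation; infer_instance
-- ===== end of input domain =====

-- B replaces A's single branched fold over a paired state (combined total + friends) with three
-- staged passes: prefix-sum list, deficit comprehension, maximum (objective: simpler).

-- ===== PORT A =====
-- A: fold over enumerate(audience) with state (tot, req), branching on tot >= s.
def standing_ovation (audience : List Int) : Int :=
  (((PySem.List.enumerate audience).foldl
      (fun (st : Int × Int) p =>
        if st.1 ≥ p.1 then (st.1 + p.2, st.2)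
        else (st.1 + (p.2 + p.1 - st.1), st.2 + (p.1 - st.1)))
      (0, 0))).2

-- ===== PORT B =====
-- B, staged: (1) the append loop builds sums, the list of audience-only prefix sums;
-- (2) a comprehension turns it into deficits; (3) max([0] + deficits) is the running-max
-- loop started at the head 0 (PySem.List.max?_id_cons: Python max of a nonempty list IS
-- this fold, and here the list literally starts with 0).
def standing_ovation_alt (audience : List Int) : Int :=
  let sums := (audience.foldl (fun (st : List Int × Int) n => (st.1 ++ [st.2], st.2 + n)) ([], 0)).1
  let deficits := (PySem.List.enumerate sums).map (fun p => p.1 - p.2)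
  deficits.foldl max 0

-- ===== PRECONDITION & SPEC =====
def Spec_standing_ovation (audience : List Int) (out : Int) : Prop := out = standing_ovation_alt audience
instance (audience : List Int) (out : Int) : Decidable (Spec_standing_ovation audience out) := by unfold Spec_standing_ovation; infer_instance

-- ===== CLAIM =====
def Claim_equal_standing_ovation : Prop := ∀ (audience : List Int), Dom_standing_ovation audience → Spec_standing_ovation audience (standing_ovation audience)

-- ===== LEMMAS AND PROOFS =====

-- Recursive description of the audience-only prefix-sum list.
def pvSums : List Int → Int → List Int
  | [], _ => []
  | n :: t, c => c :: pvSums t (c + n)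

-- B's append loop builds exactly acc ++ pvSums l c.
theorem pv_snoc_eq (l : List Int) (acc : List Int) (c : Int) :
    (l.foldl (fun (st : List Int × Int) n => (st.1 ++ [st.2], st.2 + n)) (acc, c)).1
      = acc ++ pvSums l c := by
  induction l generalizing acc c with
  | nil => simp [pvSums]
  | cons n t ih =>
    simp only [List.foldl, pvSums]
    rw [ih]
    simp

-- Core invariant: A's branched fold (with tot = c + r) computes the running maximum of r
-- and the deficits k - cum over the prefix sums starting at c, indices starting at k.
theorem pv_core (l : List Int) (k c r : Int) :
    ((PySem.List.enumerate l k).foldl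
      (fun (st : Int × Int) p =>
        if st.1 ≥ p.1 then (st.1 + p.2, st.2)
        else (st.1 + (p.2 + p.1 - st.1), st.2 + (p.1 - st.1)))
      (c + r, r)).2
    = ((PySem.List.enumerate (pvSums l c) k).map (fun p => p.1 - p.2)).foldl max r := by
  induction l generalizing k c r with
  | nil => simp [pvSums, PySem.List.enumerate_nil]
  | cons n t ih =>
    simp only [pvSums, PySem.List.enumerate_cons, List.foldl, List.map]
    by_cases h : c + r ≥ k
    · rw [if_pos h]
      have hm : max r (k - c) = r := by omega
      rw [hm]
      have e : c + r + n = (c + n) + r := by ring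
      rw [e]
      exact ih (k + 1) (c + n) r
    · rw [if_neg h]
      have hm : max r (k - c) = k - c := by omega
      rw [hm]
      have e1 : c + r + (n + k - (c + r)) = (c + n) + (k - c) := by ring
      have e2 : r + (k - (c + r)) = k - c := by ring
      rw [e1, e2]
      exact ih (k + 1) (c + n) (k - c)

-- ===== VERDICT =====
theorem standing_ovation_spec : Claim_equal_standing_ovation := by
  intro audience _
  unfold Spec_standing_ovation standing_ovation standing_ovation_alt
  rw [pv_snoc_eq audience [] 0]
  simpa using pv_core audience 0 0 0
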